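-- pv_equiv track=rewrite | github.com/christopher-henderson/502 | toolbox.py | crossover
-- ===== SOURCE A (Python) =====
-- def crossover(left, right):
--     max_left = max_right = None
--     for value in left[-1::-1]:
--         if max_left is None:
--             max_left = value
--             continue
--         max_left = max(max_left, max_left + value)
--     for value in right:
--         if max_right is None:
--             max_right = value
--             continue
--         max_right = max(max_right, max_right + value)
--     return max_left + max_right
-- ===== SOURCE B (Python) =====
-- def _clamped(seq):
--     # sum of the positive elements, by divide-and-conquer midpoint splitting
--     if not seq:
--         return 0
--     if len(seq) == 1:
--         return seq[0] if seq[0] > 0 else 0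
--     mid = len(seq) // 2
--     return _clamped(seq[:mid]) + _clamped(seq[mid:])
--
-- def crossover(left, right):
--     # each running-max fold equals its seed element plus the clamped sum of the rest,
--     # computed here by recursive halving instead of a sequential accumulator
--     return left[-1] + _clamped(left[:-1]) + right[0] + _clamped(right[1:])
-- ===== Notes on version B (the rewrite author's own statement) =====
-- stated objective: alternative
-- what changed: Replaced the two sequential running-max accumulator folds by a divide-and-conquer computation: each fold equals its seed element plus the clamped (positive-only) sum of the remaining values, which B computes by recursively splitting each list at its midpoint.
-- outside the precondition, e.g. on crossover([], [1]): A raises TypeError, B raises IndexError; on crossover([1], []): A raises TypeError, B raises IndexError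
import Mathlib
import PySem

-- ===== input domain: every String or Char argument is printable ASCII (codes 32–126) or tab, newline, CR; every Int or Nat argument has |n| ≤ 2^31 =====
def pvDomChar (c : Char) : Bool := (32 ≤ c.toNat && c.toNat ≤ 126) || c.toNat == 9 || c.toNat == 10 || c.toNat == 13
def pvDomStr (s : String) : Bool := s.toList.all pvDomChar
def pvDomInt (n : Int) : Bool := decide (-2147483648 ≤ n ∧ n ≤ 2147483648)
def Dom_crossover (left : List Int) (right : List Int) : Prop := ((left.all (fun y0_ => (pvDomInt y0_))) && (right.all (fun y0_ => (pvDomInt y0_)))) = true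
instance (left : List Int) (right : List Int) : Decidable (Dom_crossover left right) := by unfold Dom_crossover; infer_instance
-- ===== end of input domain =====

-- B replaces the two running-max folds by divide-and-conquer clamped sums (seed element +
-- positive-only sum of the rest, computed by midpoint splitting); alternative algorithm, not faster.
-- Pre_ excludes empty lists (A raises TypeError there, B raises IndexError).


-- ===== PORT A =====
-- the loop body: None-seeded running max, max_x = max(max_x, max_x + value)
def pvAcc (st : Option Int) (v : Int) : Option Int :=
  match st with
  | none => some v
  | some m => some (max m (m + v))

def crossover (left : List Int) (right : List Int) : Int :=
  -- left[-1::-1] is exactly left reversed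
  let max_left := (left.reverse).foldl pvAcc none
  let max_right := right.foldl pvAcc none
  -- Python raises TypeError when either accumulator is still None; Pre_ excludes those inputs
  max_left.getD 0 + max_right.getD 0

-- ===== PORT B =====
-- _clamped: sum of the positive elements, by divide-and-conquer midpoint splitting
def pvClamped : List Int → Int
  | [] => 0
  | [v] => if 0 < v then v else 0
  | v :: w :: rest =>
      let xs := v :: w :: rest
      pvClamped (xs.take (xs.length / 2)) + pvClamped (xs.drop (xs.length / 2))
termination_by xs => xs.length
decreasing_by
  · simpa using by omega
  · simpa using by omega

def crossover_alt (left : List Int) (right : List Int) : Int :=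
  PySem.List.pyGetD left (-1) 0
    + pvClamped (PySem.List.slice left none (some (-1)))
    + PySem.List.pyGetD right 0 0
    + pvClamped (PySem.List.slice right (some 1) none)

-- ===== PRECONDITION & SPEC =====
-- A raises TypeError (None + int) when either list is empty; both inputs must be nonempty.
def Pre_crossover (left : List Int) (right : List Int) : Prop := left ≠ [] ∧ right ≠ []
instance (left : List Int) (right : List Int) : Decidable (Pre_crossover left right) := by unfold Pre_crossover; infer_instance
def pvWitness_crossover : List Int × List Int := ([1, -2, 3], [4, -1])

def Spec_crossover (left : List Int) (right : List Int) (out : Int) : Prop := out = crossover_alt left right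
instance (left : List Int) (right : List Int) (out : Int) : Decidable (Spec_crossover left right out) := by unfold Spec_crossover; infer_instance

-- ===== CLAIM (what is proved, stated in full; the proofs are below) =====
def Claim_equal_crossover : Prop := ∀ (left : List Int) (right : List Int), Dom_crossover left right → Pre_crossover left right → Spec_crossover left right (crossover left right)

-- ===== LEMMAS AND PROOFS =====
theorem pvClamped_eq (xs : List Int) : pvClamped xs = (xs.filter (fun v => 0 < v)).sum := by
  fun_induction pvClamped xs with
  | case1 => simp
  | case2 v h => simp [h]
  | case3 v h => simp [h]
  | case4 v w rest xs ih1 ih2 =>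
    rw [ih1, ih2, ← List.sum_append, ← List.filter_append, List.take_append_drop]

theorem foldl_pvAcc_some (xs : List Int) (m : Int) :
    xs.foldl pvAcc (some m) = some (m + (xs.filter (fun v => 0 < v)).sum) := by
  induction xs generalizing m with
  | nil => simp
  | cons v vs ih =>
    simp only [List.foldl_cons, pvAcc, ih, List.filter_cons]
    by_cases h : (0:Int) < v
    · simp [h, max_eq_right (by omega : m ≤ m + v)]; ring_nf
    · simp [h, max_eq_left (by omega : m + v ≤ m)]

-- ===== VERDICT (by name: the statement is the Claim_ definition above) =====
theorem crossover_spec : Claim_equal_crossover := by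
  intro left right _ hpre
  obtain ⟨hl, hr⟩ := hpre
  unfold Spec_crossover crossover crossover_alt
  obtain ⟨l', x, rfl⟩ : ∃ l' x, left = l' ++ [x] :=
    ⟨left.dropLast, left.getLast hl, (List.dropLast_append_getLast hl).symm⟩
  cases right with
  | nil => exact absurd rfl hr
  | cons y ys =>
    rw [show (l' ++ [x]).reverse = x :: l'.reverse by simp]
    simp only [List.foldl_cons, pvAcc, foldl_pvAcc_some, pvClamped_eq,
      List.filter_reverse, List.sum_reverse,
      PySem.List.pyGetD_neg_one_append_singleton, PySem.List.pyGetD_zero_cons,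
      PySem.List.slice_to_neg_one, PySem.List.slice_from_one, List.dropLast_concat,
      Option.getD_some, List.tail_cons]
    ring
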